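-- pv_equiv track=rewrite | github.com/juliapochynok/Rubik-sCube_withLA | mul_add.py | make_matrix_with_two_ones
-- ===== SOURCE A (Python) =====
-- import copy
--
-- def set_val(matrix, val, coordinates):
--     matrix2 = copy.deepcopy(matrix)
--     for i in coordinates:
--         matrix2[i[0]][i[1]] = val
--     return matrix2
--
-- def make_matrix_with_two_ones(matrix, line):
--     res = matrix
--     if line % 2 == 0:
--         col = 0
--     else:
--         col = 2
--     for i in range(3):
--         if i == col:
--             continue
--         res = set_val(res, 1, [[0, i]])
--     return res
-- ===== SOURCE B (Python) =====
-- def make_matrix_with_two_ones(matrix, line):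
--     cols = (1, 2) if line % 2 == 0 else (0, 1)
--     return [[1 if i == 0 and j in cols else v for j, v in enumerate(row)]
--             for i, row in enumerate(matrix)]
-- ===== Notes on version B (the rewrite author's own statement) =====
-- stated objective: alternative
-- what changed: Replaces A's copy-then-mutate scheme (range(3) loop skipping col, each step deepcopying via set_val and assigning in place) by a purely functional rebuild: one enumerate-based comprehension that emits 1 at (0,j) for the parity-chosen column pair and the original value everywhere else, with no copying or index assignment at all.
import Mathlib
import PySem

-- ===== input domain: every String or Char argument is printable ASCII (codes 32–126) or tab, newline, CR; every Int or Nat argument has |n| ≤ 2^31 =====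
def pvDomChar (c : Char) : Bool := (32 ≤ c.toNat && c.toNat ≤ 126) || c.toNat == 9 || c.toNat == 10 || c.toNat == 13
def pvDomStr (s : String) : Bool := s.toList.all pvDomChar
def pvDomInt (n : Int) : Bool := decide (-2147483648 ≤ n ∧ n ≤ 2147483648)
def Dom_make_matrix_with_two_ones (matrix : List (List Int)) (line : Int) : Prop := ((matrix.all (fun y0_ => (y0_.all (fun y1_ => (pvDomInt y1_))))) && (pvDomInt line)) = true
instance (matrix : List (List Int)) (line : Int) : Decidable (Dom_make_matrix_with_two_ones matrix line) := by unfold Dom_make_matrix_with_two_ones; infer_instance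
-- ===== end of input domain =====

-- B replaces A's copy-then-mutate loop (range(3) skipping col, deepcopying set_val)
-- by a purely functional enumerate-based rebuild; return values agree on Pre_.

-- ===== PORT A =====
-- set_val: deepcopy is the identity on immutable Lean values; each coordinate pair
-- i gives the assignment matrix2[i[0]][i[1]] = val, ported with PySem pyGetD/pySetD
-- (total forms; exact under Pre_, where the indices used are in range).
def set_val (matrix : List (List Int)) (val : Int) (coordinates : List (List Int)) : List (List Int) :=
  coordinates.foldl
    (fun m2 i =>
      let r := PySem.List.pyGetD i 0 0
      let c := PySem.List.pyGetD i 1 0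
      let row := PySem.List.pyGetD m2 r []
      PySem.List.pySetD m2 r (PySem.List.pySetD row c val))
    matrix

def make_matrix_with_two_ones (matrix : List (List Int)) (line : Int) : List (List Int) :=
  let col : Int := if PySem.Int.mod line 2 = 0 then 0 else 2
  (PySem.List.pyRange 0 3 1).foldl
    (fun res i => if i = col then res else set_val res 1 [[0, i]]) matrix

-- ===== PORT B =====
-- cols = (1,2) if line % 2 == 0 else (0,1); nested enumerate comprehension:
-- 1 at (0, j) for j in cols, the original value everywhere else.
def make_matrix_with_two_ones_alt (matrix : List (List Int)) (line : Int) : List (List Int) :=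
  let cols : List Int := if PySem.Int.mod line 2 = 0 then [1, 2] else [0, 1]
  (PySem.List.enumerate matrix).map (fun ir =>
    (PySem.List.enumerate ir.2).map (fun jv =>
      if ir.1 = 0 ∧ jv.1 ∈ cols then 1 else jv.2))

-- ===== PRECONDITION & SPEC =====
-- Pre_ excludes exactly the inputs where the Python A raises IndexError: an empty
-- matrix, or a first row too short for the two assigned columns (cols 1,2 for even
-- line, cols 0,1 for odd line).
def Pre_make_matrix_with_two_ones (matrix : List (List Int)) (line : Int) : Prop :=
  matrix ≠ [] ∧ (if PySem.Int.mod line 2 = 0 then 3 else 2) ≤ matrix.headI.length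
instance (matrix : List (List Int)) (line : Int) : Decidable (Pre_make_matrix_with_two_ones matrix line) := by unfold Pre_make_matrix_with_two_ones; infer_instance

def pvWitness_make_matrix_with_two_ones : List (List Int) × Int := ([[0, 0, 0], [5, 6, 7]], 4)

def Spec_make_matrix_with_two_ones (matrix : List (List Int)) (line : Int) (out : List (List Int)) : Prop := out = make_matrix_with_two_ones_alt matrix line
instance (matrix : List (List Int)) (line : Int) (out : List (List Int)) : Decidable (Spec_make_matrix_with_two_ones matrix line out) := by unfold Spec_make_matrix_with_two_ones; infer_instance

-- ===== CLAIM (what is proved, stated in full; the proofs are below) =====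
def Claim_equal_make_matrix_with_two_ones : Prop := ∀ (matrix : List (List Int)) (line : Int), Dom_make_matrix_with_two_ones matrix line → Pre_make_matrix_with_two_ones matrix line → Spec_make_matrix_with_two_ones matrix line (make_matrix_with_two_ones matrix line)


-- ===== LEMMAS AND PROOFS =====

-- mapping over an enumeration with a function that is the identity on every index
-- the enumeration actually uses returns the original list
theorem pv_enum_map_id {α : Type} (t : List α) (f : Int × α → α) :
    ∀ (s : Int), (∀ j v, s ≤ j → f (j, v) = v) →
      (PySem.List.enumerate t s).map f = t := by
  induction t with
  | nil => intro s _; simp [PySem.List.enumerate_nil]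
  | cons x xs ih =>
      intro s h
      rw [PySem.List.enumerate_cons, List.map_cons, h s x le_rfl,
        ih (s + 1) (fun j v hj => h j v (by omega))]

-- B's outer comprehension: the head row is rebuilt with the cols rule, all later
-- rows (index ≥ 1) are returned unchanged
theorem pv_alt_eval (r : List Int) (rest : List (List Int)) (cols : List Int) :
    (PySem.List.enumerate (r :: rest)).map (fun ir =>
      (PySem.List.enumerate ir.2).map (fun jv => if ir.1 = 0 ∧ jv.1 ∈ cols then 1 else jv.2))
    = ((PySem.List.enumerate r).map (fun jv => if jv.1 ∈ cols then 1 else jv.2)) :: rest := by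
  rw [PySem.List.enumerate_cons, List.map_cons, zero_add]
  congr 1
  · simp
  · refine pv_enum_map_id rest _ 1 ?_
    intro j v hj
    have hj0 : ¬ (j = 0) := by omega
    refine pv_enum_map_id v _ 0 ?_
    intro k w _
    simp [hj0]

-- the head-row rebuild on a row of length ≥ 3 with cols = [1, 2]
theorem pv_row_even (a b c : Int) (t : List Int) :
    (PySem.List.enumerate (a :: b :: c :: t)).map
      (fun jv => if jv.1 ∈ ([1, 2] : List Int) then 1 else jv.2) = a :: 1 :: 1 :: t := by
  have ht : (PySem.List.enumerate t 3).map
      (fun jv => if jv.1 = 1 ∨ jv.1 = 2 then 1 else jv.2) = t := by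
    refine pv_enum_map_id t _ 3 ?_
    intro j v hj
    show (if (j : Int) = 1 ∨ j = 2 then (1 : Int) else v) = v
    rw [if_neg (by omega)]
  simp [PySem.List.enumerate_cons]
  exact ht

-- the head-row rebuild on a row of length ≥ 2 with cols = [0, 1]
theorem pv_row_odd (a b : Int) (t : List Int) :
    (PySem.List.enumerate (a :: b :: t)).map
      (fun jv => if jv.1 ∈ ([0, 1] : List Int) then 1 else jv.2) = 1 :: 1 :: t := by
  have ht : (PySem.List.enumerate t 2).map
      (fun jv => if jv.1 = 0 ∨ jv.1 = 1 then 1 else jv.2) = t := by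
    refine pv_enum_map_id t _ 2 ?_
    intro j v hj
    show (if (j : Int) = 0 ∨ j = 1 then (1 : Int) else v) = v
    rw [if_neg (by omega)]
  simp [PySem.List.enumerate_cons]
  exact ht

theorem make_matrix_with_two_ones_spec : Claim_equal_make_matrix_with_two_ones := by
  intro matrix line _ pre
  obtain ⟨hne, hlen⟩ := pre
  obtain _ | ⟨r, rest⟩ := matrix
  · exact absurd rfl hne
  unfold Spec_make_matrix_with_two_ones make_matrix_with_two_ones make_matrix_with_two_ones_alt set_val
  by_cases h : PySem.Int.mod line 2 = 0
  · -- even: col = 0, A sets cells (0,1) and (0,2) to 1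
    simp only [h, if_true, List.headI] at hlen ⊢
    rw [pv_alt_eval]
    obtain _ | ⟨a, r⟩ := r; · simp at hlen
    obtain _ | ⟨b, r⟩ := r; · simp at hlen
    obtain _ | ⟨c, r⟩ := r; · simp at hlen
    rw [pv_row_even]
    simp [PySem.List.pyRange, PySem.List.pyGetD, PySem.List.pyGet?, PySem.List.pyIdx?,
      PySem.List.pySetD, PySem.List.pySet?, List.set, List.range_succ]
    split_ifs <;> simp_all
    omega
  · -- odd: col = 2, A sets cells (0,0) and (0,1) to 1
    simp only [h, if_false, List.headI] at hlen ⊢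
    rw [pv_alt_eval]
    obtain _ | ⟨a, r⟩ := r; · simp at hlen
    obtain _ | ⟨b, r⟩ := r; · simp at hlen
    rw [pv_row_odd]
    simp [PySem.List.pyRange, PySem.List.pyGetD, PySem.List.pyGet?, PySem.List.pyIdx?,
      PySem.List.pySetD, PySem.List.pySet?, List.set, List.range_succ]
    split_ifs <;> simp_all
    omega
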